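-- pv_equiv track=rewrite | github.com/Ashiq-am/Data-Structures-Algorithm | 1.Python Algorithms/8.Bitwise Algorithms/2.Intermediate/70.Alternate bits of two numbers to create a new number/Alternate bits of two numbers to create a new number.py | setevenbits
-- ===== SOURCE A (Python) =====
-- def setevenbits(n):
--     temp = n
--     count = 0
--
--     # res for store 101010.. number
--     res = 0
--
--     # generate number form of 101010.....
--     # till temp size
--     while temp > 0:
--
--         # if bit is even then generate
--         # number and or with res
--         if count % 2:
--             res |= (1 << count)
--
--         count += 1
--         temp >>= 1
--
--     # return set even bit number
--     return (n & res)
-- ===== SOURCE B (Python) =====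
-- def setevenbits(n):
--     # closed-form odd-position mask instead of the bit-by-bit loop
--     if n <= 0:
--         return 0
--     w = n.bit_length()
--     mask = 2 * (4 ** w - 1) // 3   # 0b1010...10 with w ones, covers all bits of n
--     return n & mask
-- ===== Notes on version B (the rewrite author's own statement) =====
-- stated objective: simpler
-- what changed: Replaces A's bit-by-bit mask-building loop with a single closed-form arithmetic expression for the alternating odd-bit mask of width n.bit_length() (guarding non-positive n with an early return), then one AND.
import Mathlib
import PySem

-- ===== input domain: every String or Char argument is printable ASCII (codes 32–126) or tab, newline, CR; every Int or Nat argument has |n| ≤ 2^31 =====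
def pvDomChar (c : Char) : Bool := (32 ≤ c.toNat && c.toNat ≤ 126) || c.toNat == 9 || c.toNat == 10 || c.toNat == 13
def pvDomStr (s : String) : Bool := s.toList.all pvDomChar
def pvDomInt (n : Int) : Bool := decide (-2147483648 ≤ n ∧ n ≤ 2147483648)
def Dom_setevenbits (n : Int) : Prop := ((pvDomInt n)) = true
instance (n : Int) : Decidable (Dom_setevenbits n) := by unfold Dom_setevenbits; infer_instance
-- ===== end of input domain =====

-- B replaces A's mask-building loop by the closed-form mask 2*(4^bit_length(n)-1)//3; objective: simpler.

-- ===== PORT A =====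
-- the while loop: state (temp, count, res); count is a Nat (it starts at 0 and is only incremented)
def setevenbitsLoop (temp : Int) (count : Nat) (res : Int) : Int :=
  if h : 0 < temp then
    setevenbitsLoop (temp >>> (1:Nat)) (count + 1)
      (if count % 2 = 1 then PySem.Int.bor res ((1:Int) <<< count) else res)
  else res
termination_by temp.toNat
decreasing_by
  have h2 : temp >>> (1:Nat) = temp / 2 := by simp [Int.shiftRight_eq_div_pow]
  rw [h2]; omega

def setevenbits (n : Int) : Int :=
  PySem.Int.band n (setevenbitsLoop n 0 0)

-- ===== PORT B =====
def setevenbits_alt (n : Int) : Int :=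
  if n ≤ 0 then 0
  else
    let w := PySem.Int.bitLength n
    let mask := PySem.Int.floordiv (2 * (4 ^ w - 1)) 3
    PySem.Int.band n mask

-- ===== PRECONDITION & SPEC =====
def Spec_setevenbits (n : Int) (out : Int) : Prop := out = setevenbits_alt n
instance (n : Int) (out : Int) : Decidable (Spec_setevenbits n out) := by unfold Spec_setevenbits; infer_instance

-- ===== CLAIM (what is proved, stated in full; the proofs are below) =====
def Claim_equal_setevenbits : Prop := ∀ (n : Int), Dom_setevenbits n → Spec_setevenbits n (setevenbits n)

-- ===== LEMMAS AND PROOFS =====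

-- Nat mirror of A's loop
def loopN (t c r : Nat) : Nat :=
  if t = 0 then r
  else loopN (t / 2) (c + 1) (if c % 2 = 1 then r ||| (1 <<< c) else r)
termination_by t

-- number of loop iterations = Python's bit_length
def lenN (t : Nat) : Nat :=
  if t = 0 then 0 else lenN (t / 2) + 1
termination_by t

-- the closed-form mask, as a recursion
def oddMask : Nat → Nat
  | 0 => 0
  | w + 1 => 4 * oddMask w + 2

theorem loop_natCast : ∀ t c r : Nat, setevenbitsLoop (t : Int) c (r : Int) = (loopN t c r : Int) := by
  intro t
  induction t using Nat.strong_induction_on with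
  | _ t ih =>
    intro c r
    rw [setevenbitsLoop, loopN]
    by_cases h : t = 0
    · simp [h]
    · have hp : (0:Int) < (t:Int) := by exact_mod_cast Nat.pos_of_ne_zero h
      have h2 : (t : Int) >>> (1:Nat) = ((t / 2 : Nat) : Int) := by
        simp [Int.shiftRight_eq_div_pow, Int.natCast_ediv]
      have h1 : ((1:Int) <<< c) = ((1 <<< c : Nat) : Int) := by
        simp [Int.shiftLeft_eq, Nat.shiftLeft_eq]
      simp only [hp, dif_pos, if_neg h, h2, h1]
      by_cases hc : c % 2 = 1
      · simp only [hc, if_pos, PySem.Int.bor_natCast]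
        exact ih (t / 2) (by omega) (c + 1) (r ||| 1 <<< c)
      · simp only [hc]
        exact ih (t / 2) (by omega) (c + 1) r

theorem lenN_eq_bitLength : ∀ t : Nat, lenN t = PySem.Int.bitLength (t : Int) := by
  intro t
  induction t using Nat.strong_induction_on with
  | _ t ih =>
    rw [lenN]
    by_cases h : t = 0
    · simp [h, PySem.Int.bitLength_zero]
    · rw [if_neg h, PySem.Int.bitLength_natCast (Nat.pos_of_ne_zero h),
        ih (t / 2) (by omega)]

theorem testBit_lt_lenN : ∀ t i : Nat, t.testBit i = true → i < lenN t := by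
  intro t
  induction t using Nat.strong_induction_on with
  | _ t ih =>
    intro i hb
    have ht : t ≠ 0 := by rintro rfl; simp [Nat.testBit] at hb
    rw [lenN, if_neg ht]
    cases i with
    | zero => omega
    | succ j =>
      rw [Nat.testBit_succ] at hb
      have := ih (t / 2) (by omega) j hb
      omega

theorem loopN_testBit : ∀ t c r i : Nat,
    (loopN t c r).testBit i =
      (r.testBit i || (decide (i % 2 = 1) && decide (c ≤ i) && decide (i < c + lenN t))) := by
  intro t
  induction t using Nat.strong_induction_on with
  | _ t ih =>
    intro c r i
    rw [loopN, lenN]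
    by_cases h : t = 0
    · simp [h]
    · rw [if_neg h, if_neg h, ih (t / 2) (by omega)]
      have h1 : Nat.testBit 1 (i - c) = decide (i - c = 0) := by
        rcases Nat.eq_zero_or_pos (i - c) with h0 | h0
        · simp [h0]
        · obtain ⟨j, hj⟩ := Nat.exists_eq_add_of_le h0
          rw [hj, Nat.add_comm 1 j, Nat.testBit_succ]
          simp
      by_cases hc : c % 2 = 1
      · rw [if_pos hc, Nat.testBit_or, Nat.testBit_shiftLeft, h1, Bool.eq_iff_iff]
        simp only [Bool.or_eq_true, Bool.and_eq_true, decide_eq_true_eq]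
        by_cases hr : r.testBit i = true <;> simp [hr] <;> omega
      · rw [if_neg hc, Bool.eq_iff_iff]
        simp only [Bool.or_eq_true, Bool.and_eq_true, decide_eq_true_eq]
        by_cases hr : r.testBit i = true <;> simp [hr] <;> omega

theorem oddMask_testBit : ∀ w i : Nat,
    (oddMask w).testBit i = (decide (i % 2 = 1) && decide (i < 2 * w)) := by
  intro w
  induction w with
  | zero => intro i; simp [oddMask]
  | succ v ih =>
    intro i
    rw [oddMask]
    match i with
    | 0 => simp [Nat.testBit_zero]; omega
    | 1 =>
      have : (4 * oddMask v + 2).testBit 1 = ((4 * oddMask v + 2) / 2).testBit 0 := Nat.testBit_succ ..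
      rw [this]
      have h2 : (4 * oddMask v + 2) / 2 = 2 * oddMask v + 1 := by omega
      rw [h2]
      simp [Nat.testBit_zero]; omega
    | j + 2 =>
      have s1 : (4 * oddMask v + 2).testBit (j + 2) = ((4 * oddMask v + 2) / 2).testBit (j + 1) := Nat.testBit_succ ..
      have h2 : (4 * oddMask v + 2) / 2 = 2 * oddMask v + 1 := by omega
      have s2 : (2 * oddMask v + 1).testBit (j + 1) = ((2 * oddMask v + 1) / 2).testBit j := Nat.testBit_succ ..
      have h3 : (2 * oddMask v + 1) / 2 = oddMask v := by omega
      rw [s1, h2, s2, h3, ih j]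
      have e1 : (decide ((j + 2) % 2 = 1)) = (decide (j % 2 = 1)) := by
        simp only [decide_eq_decide]; omega
      have e2 : (decide (j + 2 < 2 * (v + 1))) = (decide (j < 2 * v)) := by
        simp only [decide_eq_decide]; omega
      rw [e1, e2]

theorem oddMask_closed_form : ∀ w : Nat, 3 ∣ 4 ^ w - 1 ∧ 2 * (4 ^ w - 1) / 3 = oddMask w := by
  intro w
  induction w with
  | zero => simp [oddMask]
  | succ v ih =>
    obtain ⟨hdvd, heq⟩ := ih
    obtain ⟨k, hk⟩ := hdvd
    have hpow : 1 ≤ 4 ^ v := Nat.one_le_pow _ _ (by omega)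
    have hx : 4 ^ v = 3 * k + 1 := by omega
    have hx1 : 4 ^ (v + 1) = 12 * k + 4 := by rw [pow_succ, hx]; ring
    constructor
    · rw [hx1]; exact ⟨4 * k + 1, by omega⟩
    · rw [oddMask, ← heq, hx1, hx]
      omega

-- main Nat-level equality
theorem main_nat (m : Nat) : m &&& loopN m 0 0 = m &&& oddMask (lenN m) := by
  apply Nat.eq_of_testBit_eq
  intro i
  rw [Nat.testBit_and, Nat.testBit_and, loopN_testBit, oddMask_testBit]
  by_cases hm : m.testBit i
  · have hlt : i < lenN m := testBit_lt_lenN m i hm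
    have h2 : i < 2 * lenN m := by omega
    simp [hm, hlt, h2]
  · simp [hm]

theorem lenN_pos_bridge (n : Int) (hn : 0 < n) :
    PySem.Int.bitLength n = lenN n.toNat := by
  rw [lenN_eq_bitLength]
  congr 1
  omega

theorem mask_cast (w : Nat) :
    PySem.Int.floordiv (2 * (4 ^ w - 1)) 3 = (oddMask w : Int) := by
  have hpow : 1 ≤ 4 ^ w := Nat.one_le_pow _ _ (by omega)
  have hc : (2 * ((4:Int) ^ w - 1)) = ((2 * (4 ^ w - 1) : Nat) : Int) := by
    push_cast [hpow]; ring
  rw [hc]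
  rw [show (3:Int) = ((3:Nat):Int) from rfl, PySem.Int.floordiv_natCast]
  exact_mod_cast congrArg (Nat.cast (R := Int)) (oddMask_closed_form w).2

-- ===== VERDICT (by name: the statement is the Claim_ definition above) =====
theorem setevenbits_spec : Claim_equal_setevenbits := by
  intro n _
  unfold Spec_setevenbits setevenbits setevenbits_alt
  by_cases hn : n ≤ 0
  · rw [setevenbitsLoop]
    have : ¬ (0 < n) := by omega
    simp [this, hn, PySem.Int.band_zero]
  · have hn : 0 < n := by omega
    rw [if_neg (by omega)]
    show PySem.Int.band n (setevenbitsLoop n 0 0) =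
      PySem.Int.band n (PySem.Int.floordiv (2 * (4 ^ PySem.Int.bitLength n - 1)) 3)
    have hm : n = ((n.toNat : Nat) : Int) := by omega
    rw [mask_cast, lenN_pos_bridge n hn]
    conv_lhs => rw [hm, show (0:Int) = ((0:Nat):Int) from rfl, loop_natCast]
    conv_rhs => rw [hm]
    rw [PySem.Int.band_natCast, PySem.Int.band_natCast, main_nat, Int.toNat_natCast]
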